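-- pv_equiv track=rewrite | github.com/Zeeka32/AI-Project | utilities.py | get_score_core
-- ===== SOURCE A (Python) =====
-- def horizon(board, color, i, j, v):
--     if j not in range(0, len(board[0])) or board[i][j] != color:
--         return 0
--
--     return 1+horizon(board, color, i, j+v, v)
--
-- def vertical(board, color, i, j, v):
--     if i not in range(0, len(board)) or board[i][j] != color:
--         return 0
--
--     return 1+vertical(board, color, i+v, j, v)
--
-- def diagonal(board, color, i, j, v, e):
--     if j not in range(0, len(board[0])) or i not in range(0, len(board)) or board[i][j] != color:
--         return 0
--
--     return 1+diagonal(board, color, i+v, j+e, v, e)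
--
-- def get_score_core(board, i, j):
--     l = [horizon(board, board[i][j], i, j, -1) + horizon(board, board[i][j], i, j, 1) - 1,
--     vertical(board, board[i][j], i, j, -1) + vertical(board, board[i][j], i, j, 1) - 1,
--     diagonal(board, board[i][j], i, j, -1, 1) + diagonal(board, board[i][j], i, j, 1, -1) - 1,
--     diagonal(board, board[i][j], i, j, -1, -1) + diagonal(board, board[i][j], i, j, 1, 1) - 1]
--
--     two = 0
--     three = 0
--
--     for x in l:
--         if x == 2:
--             two += 1
--         elif x == 3:
--             three += 1
--
--     score = 4 if j == 3 else 0
--     score += two*2 + three*5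
--
--     return score
-- ===== SOURCE B (Python) =====
-- def get_score_core(board, i, j):
--     color = board[i][j]
--     H, W = len(board), len(board[0])
--     two = three = 0
--     for dr, dc in ((0, 1), (1, 0), (1, -1), (1, 1)):
--         run = 1
--         for s in (1, -1):
--             r, c = i + dr * s, j + dc * s
--             while 0 <= r < H and 0 <= c < W and board[r][c] == color:
--                 run += 1
--                 r += dr * s
--                 c += dc * s
--         if run == 2:
--             two += 1
--         elif run == 3:
--             three += 1
--     return (4 if j == 3 else 0) + two * 2 + three * 5
-- ===== Notes on version B (the rewrite author's own statement) =====
-- stated objective: simpler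
-- what changed: Replaces the four asymmetric recursive direction helpers and the run-list/for-loop tally with one data-driven loop over the four direction vectors, walking outward iteratively from the centre in both senses with a uniform bounds check and tallying runs inline.
-- outside the precondition, e.g. on get_score_core([[1, 1], [0, 0]], -1, 0): A returns 2, B returns 0; on get_score_core([[0, 0], [0, 0, 1], [1, 1, 0]], 2, 2): A returns 0, B returns 5
import Mathlib
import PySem

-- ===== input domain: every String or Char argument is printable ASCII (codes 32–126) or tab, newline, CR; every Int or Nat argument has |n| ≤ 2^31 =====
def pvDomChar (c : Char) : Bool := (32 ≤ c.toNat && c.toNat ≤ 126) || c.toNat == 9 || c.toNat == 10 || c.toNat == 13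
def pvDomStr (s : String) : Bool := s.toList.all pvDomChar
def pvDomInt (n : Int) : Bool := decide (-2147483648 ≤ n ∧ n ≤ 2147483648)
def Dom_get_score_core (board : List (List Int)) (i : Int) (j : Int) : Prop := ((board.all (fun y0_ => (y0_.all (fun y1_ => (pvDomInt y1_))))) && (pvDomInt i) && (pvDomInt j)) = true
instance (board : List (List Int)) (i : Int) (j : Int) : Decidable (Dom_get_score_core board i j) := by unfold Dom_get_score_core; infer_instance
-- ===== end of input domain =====

-- B inlines A's four recursive direction helpers into one loop over direction
-- vectors with iterative outward walks and inline tallying (objective: simpler).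

-- ===== PORT A =====
-- board[i][j] with Python's negative-index rule; none = IndexError
def pvAt (board : List (List Int)) (i j : Int) : Option Int :=
  (PySem.List.pyGet? board i).bind (fun row => PySem.List.pyGet? row j)

-- fuel only makes the Python recursion structural; inside Pre_ it never runs out
def pvHorizon (fuel : Nat) (board : List (List Int)) (color i j v : Int) : Int :=
  match fuel with
  | 0 => 0
  | f+1 =>
    if (0 ≤ j ∧ j < ((board.headD []).length : Int)) ∧ pvAt board i j = some color
    then 1 + pvHorizon f board color i (j + v) v
    else 0

def pvVertical (fuel : Nat) (board : List (List Int)) (color i j v : Int) : Int :=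
  match fuel with
  | 0 => 0
  | f+1 =>
    if (0 ≤ i ∧ i < (board.length : Int)) ∧ pvAt board i j = some color
    then 1 + pvVertical f board color (i + v) j v
    else 0

def pvDiagonal (fuel : Nat) (board : List (List Int)) (color i j v e : Int) : Int :=
  match fuel with
  | 0 => 0
  | f+1 =>
    if (0 ≤ j ∧ j < ((board.headD []).length : Int)) ∧
       (0 ≤ i ∧ i < (board.length : Int)) ∧ pvAt board i j = some color
    then 1 + pvDiagonal f board color (i + v) (j + e) v e
    else 0

def get_score_core (board : List (List Int)) (i : Int) (j : Int) : Int :=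
  let color := (pvAt board i j).getD 0
  let fuel := board.length + (board.headD []).length + 1
  let l := [pvHorizon fuel board color i j (-1) + pvHorizon fuel board color i j 1 - 1,
            pvVertical fuel board color i j (-1) + pvVertical fuel board color i j 1 - 1,
            pvDiagonal fuel board color i j (-1) 1 + pvDiagonal fuel board color i j 1 (-1) - 1,
            pvDiagonal fuel board color i j (-1) (-1) + pvDiagonal fuel board color i j 1 1 - 1]
  let p := l.foldl (fun (p : Int × Int) x =>
            if x = 2 then (p.1 + 1, p.2) else if x = 3 then (p.1, p.2 + 1) else p) (0, 0)
  (if j = 3 then (4 : Int) else 0) + p.1 * 2 + p.2 * 5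

-- ===== PORT B =====
def pvWalk (fuel : Nat) (board : List (List Int)) (H W color r c dr dc : Int) : Int :=
  match fuel with
  | 0 => 0
  | f+1 =>
    if (0 ≤ r ∧ r < H) ∧ (0 ≤ c ∧ c < W) ∧ pvAt board r c = some color
    then 1 + pvWalk f board H W color (r + dr) (c + dc) dr dc
    else 0

def pvRun (fuel : Nat) (board : List (List Int)) (H W color i j dr dc : Int) : Int :=
  1 + pvWalk fuel board H W color (i + dr) (j + dc) dr dc
    + pvWalk fuel board H W color (i - dr) (j - dc) (-dr) (-dc)

def pvTally (p : Int × Int) (run : Int) : Int × Int :=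
  if run = 2 then (p.1 + 1, p.2) else if run = 3 then (p.1, p.2 + 1) else p

def get_score_core_alt (board : List (List Int)) (i : Int) (j : Int) : Int :=
  let color := (pvAt board i j).getD 0
  let H := (board.length : Int)
  let W := ((board.headD []).length : Int)
  let fuel := board.length + (board.headD []).length
  let p := pvTally (pvTally (pvTally (pvTally (0, 0)
             (pvRun fuel board H W color i j 0 1))
             (pvRun fuel board H W color i j 1 0))
             (pvRun fuel board H W color i j 1 (-1)))
             (pvRun fuel board H W color i j 1 1)
  (if j = 3 then (4 : Int) else 0) + p.1 * 2 + p.2 * 5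

-- ===== PRECONDITION & SPEC =====
-- Pre_ restricts to the natural domain: a nonempty rectangular board with
-- 0 ≤ i < height and 0 ≤ j < width. Outside it A raises IndexError (empty or
-- many ragged boards) or returns via Python's negative-index wraparound /
-- row-0-width bounds applied to other rows (ragged boards) — accidents of A's
-- representation outside the game's board domain.
def Pre_get_score_core (board : List (List Int)) (i : Int) (j : Int) : Prop :=
  board ≠ [] ∧ (∀ row ∈ board, row.length = (board.headD []).length) ∧
  0 ≤ i ∧ i < (board.length : Int) ∧ 0 ≤ j ∧ j < ((board.headD []).length : Int)

instance (board : List (List Int)) (i : Int) (j : Int) : Decidable (Pre_get_score_core board i j) := by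
  unfold Pre_get_score_core; infer_instance

def pvWitness_get_score_core : List (List Int) × Int × Int := ([[1, 1], [0, 1]], 0, 1)

def Spec_get_score_core (board : List (List Int)) (i : Int) (j : Int) (out : Int) : Prop := out = get_score_core_alt board i j
instance (board : List (List Int)) (i : Int) (j : Int) (out : Int) : Decidable (Spec_get_score_core board i j out) := by unfold Spec_get_score_core; infer_instance

-- ===== CLAIM (what is proved, stated in full; the proofs are below) =====
def Claim_equal_get_score_core : Prop := ∀ (board : List (List Int)) (i : Int) (j : Int), Dom_get_score_core board i j → Pre_get_score_core board i j → Spec_get_score_core board i j (get_score_core board i j)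

-- ===== LEMMAS AND PROOFS =====

-- inside the board, pvAt is a real value
lemma pvAt_isSome (board : List (List Int)) (i j : Int)
    (h : Pre_get_score_core board i j) : pvAt board i j = some ((pvAt board i j).getD 0) := by
  obtain ⟨hne, hrect, hi0, hiH, hj0, hjW⟩ := h
  have hi' : i < (board.length : Int) := hiH
  have hrow : PySem.List.pyGet? board i = some board[i.toNat] :=
    PySem.List.pyGet?_eq_some_getElem board hi0 hi'
  have hlen : (board[i.toNat]).length = (board.headD []).length :=
    hrect _ (List.getElem_mem (by omega))
  have hj' : j < ((board[i.toNat]).length : Int) := by omega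
  have hcell : PySem.List.pyGet? board[i.toNat] j = some (board[i.toNat])[j.toNat] :=
    PySem.List.pyGet?_eq_some_getElem board[i.toNat] hj0 hj'
  simp [pvAt, hrow, hcell]

-- horizon walks a fixed in-range row: same steps as pvWalk with dr = 0
lemma horizon_eq_walk (board : List (List Int)) (color i : Int)
    (hi : 0 ≤ i ∧ i < (board.length : Int)) :
    ∀ (fuel : Nat) (j v : Int),
      pvHorizon fuel board color i j v =
      pvWalk fuel board (board.length : Int) ((board.headD []).length : Int) color i j 0 v := by
  intro fuel
  induction fuel with
  | zero => intro j v; rfl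
  | succ f ih =>
    intro j v
    simp only [pvHorizon, pvWalk]
    by_cases h : (0 ≤ j ∧ j < ((board.headD []).length : Int)) ∧ pvAt board i j = some color
    · rw [if_pos h, if_pos ⟨hi, h.1, h.2⟩, ih]
      norm_num
    · rw [if_neg h, if_neg (by tauto)]

-- vertical walks a fixed in-range column: same steps as pvWalk with dc = 0
lemma vertical_eq_walk (board : List (List Int)) (color j : Int)
    (hj : 0 ≤ j ∧ j < ((board.headD []).length : Int)) :
    ∀ (fuel : Nat) (i v : Int),
      pvVertical fuel board color i j v =
      pvWalk fuel board (board.length : Int) ((board.headD []).length : Int) color i j v 0 := by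
  intro fuel
  induction fuel with
  | zero => intro i v; rfl
  | succ f ih =>
    intro i v
    simp only [pvVertical, pvWalk]
    by_cases h : (0 ≤ i ∧ i < (board.length : Int)) ∧ pvAt board i j = some color
    · rw [if_pos h, if_pos ⟨h.1, hj, h.2⟩, ih]
      norm_num
    · rw [if_neg h, if_neg (by tauto)]

-- diagonal checks both bounds, exactly pvWalk's condition
lemma diagonal_eq_walk (board : List (List Int)) (color : Int) :
    ∀ (fuel : Nat) (i j v e : Int),
      pvDiagonal fuel board color i j v e =
      pvWalk fuel board (board.length : Int) ((board.headD []).length : Int) color i j v e := by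
  intro fuel
  induction fuel with
  | zero => intro i j v e; rfl
  | succ f ih =>
    intro i j v e
    simp only [pvDiagonal, pvWalk]
    by_cases h : (0 ≤ j ∧ j < ((board.headD []).length : Int)) ∧
                 (0 ≤ i ∧ i < (board.length : Int)) ∧ pvAt board i j = some color
    · rw [if_pos h, if_pos ⟨h.2.1, h.1, h.2.2⟩, ih]
    · rw [if_neg h, if_neg (by tauto)]

-- ===== VERDICT (by name: the statement is the Claim_ definition above) =====
theorem get_score_core_spec : Claim_equal_get_score_core := by
  intro board i j _ hpre
  unfold Spec_get_score_core get_score_core get_score_core_alt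
  obtain ⟨hne, hrect, hi0, hiH, hj0, hjW⟩ := hpre
  have hcenter := pvAt_isSome board i j ⟨hne, hrect, hi0, hiH, hj0, hjW⟩
  set color := (pvAt board i j).getD 0 with hc
  set H := (board.length : Int)
  set W := ((board.headD []).length : Int)
  set F := board.length + (board.headD []).length with hF
  -- unfold one recursion step of each A-helper at the centre (condition holds)
  have hcondH : (0 ≤ j ∧ j < W) ∧ pvAt board i j = some color := ⟨⟨hj0, hjW⟩, hcenter⟩
  have hcondV : (0 ≤ i ∧ i < H) ∧ pvAt board i j = some color := ⟨⟨hi0, hiH⟩, hcenter⟩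
  have hcondD : (0 ≤ j ∧ j < W) ∧ (0 ≤ i ∧ i < H) ∧ pvAt board i j = some color :=
    ⟨⟨hj0, hjW⟩, ⟨hi0, hiH⟩, hcenter⟩
  have hh : ∀ v : Int, pvHorizon (F + 1) board color i j v = 1 + pvHorizon F board color i (j + v) v := by
    intro v; simp only [pvHorizon]; rw [if_pos hcondH]
  have hv : ∀ v : Int, pvVertical (F + 1) board color i j v = 1 + pvVertical F board color (i + v) j v := by
    intro v; simp only [pvVertical]; rw [if_pos hcondV]
  have hd : ∀ v e : Int, pvDiagonal (F + 1) board color i j v e = 1 + pvDiagonal F board color (i + v) (j + e) v e := by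
    intro v e; simp only [pvDiagonal]; rw [if_pos hcondD]
  have r1 : pvHorizon (F + 1) board color i j (-1) + pvHorizon (F + 1) board color i j 1 - 1
      = pvRun F board H W color i j 0 1 := by
    rw [hh, hh, horizon_eq_walk board color i ⟨hi0, hiH⟩, horizon_eq_walk board color i ⟨hi0, hiH⟩]
    simp only [pvRun, sub_eq_add_neg, add_zero, neg_zero, neg_neg, sub_zero]
    ring
  have r2 : pvVertical (F + 1) board color i j (-1) + pvVertical (F + 1) board color i j 1 - 1
      = pvRun F board H W color i j 1 0 := by
    rw [hv, hv, vertical_eq_walk board color j ⟨hj0, hjW⟩, vertical_eq_walk board color j ⟨hj0, hjW⟩]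
    simp only [pvRun, sub_eq_add_neg, add_zero, neg_zero, neg_neg, sub_zero]
    ring
  have r3 : pvDiagonal (F + 1) board color i j (-1) 1 + pvDiagonal (F + 1) board color i j 1 (-1) - 1
      = pvRun F board H W color i j 1 (-1) := by
    rw [hd, hd, diagonal_eq_walk board color, diagonal_eq_walk board color]
    simp only [pvRun, sub_eq_add_neg, add_zero, neg_zero, neg_neg, sub_zero]
    ring
  have r4 : pvDiagonal (F + 1) board color i j (-1) (-1) + pvDiagonal (F + 1) board color i j 1 1 - 1
      = pvRun F board H W color i j 1 1 := by
    rw [hd, hd, diagonal_eq_walk board color, diagonal_eq_walk board color]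
    simp only [pvRun, sub_eq_add_neg, add_zero, neg_zero, neg_neg, sub_zero]
    ring
  simp only [r1, r2, r3, r4, List.foldl, pvTally]
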